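-- pv_equiv track=rewrite | github.com/Starcage1/StarTools-MMDC | mmdc.py | group_dupes_by_name
-- ===== SOURCE A (Python) =====
-- from collections import defaultdict
-- from typing import Iterable, Dict, Tuple, List
--
-- def normalize_name_for_compare(text: str, case_insensitive: bool, treat_underscores_as_spaces: bool) -> str:
--     t = text.replace("_", " ") if treat_underscores_as_spaces else text
--     return t.lower() if case_insensitive else t
--
-- def group_dupes_by_name(ids_to_names: Dict[str, str],
--                         case_insensitive: bool,
--                         treat_underscores_as_spaces: bool) -> Dict[str, List[str]]:
--     name_groups = defaultdict(list)
--     for item_id, nm in ids_to_names.items():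
--         k = normalize_name_for_compare(nm, case_insensitive, treat_underscores_as_spaces)
--         name_groups[k].append(item_id)
--     return {n: lst for n, lst in name_groups.items() if len(lst) >= 2}
-- ===== SOURCE B (Python) =====
-- from collections import Counter
--
-- def _normalize(text, case_insensitive, treat_underscores_as_spaces):
--     t = text.replace("_", " ") if treat_underscores_as_spaces else text
--     return t.lower() if case_insensitive else t
--
-- def group_dupes_by_name(ids_to_names, case_insensitive, treat_underscores_as_spaces):
--     counts = Counter(_normalize(nm, case_insensitive, treat_underscores_as_spaces)
--                      for nm in ids_to_names.values())
--     result = {}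
--     for item_id, nm in ids_to_names.items():
--         k = _normalize(nm, case_insensitive, treat_underscores_as_spaces)
--         if counts[k] >= 2:
--             result.setdefault(k, []).append(item_id)
--     return result
-- ===== Notes on version B (the rewrite author's own statement) =====
-- stated objective: alternative
-- what changed: B replaces A's build-all-groups-then-filter with a two-pass count-then-collect: a first pass builds a Counter of normalized names, a second pass appends only ids whose normalized name occurs at least twice, so no singleton group is ever materialized.
import Mathlib
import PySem

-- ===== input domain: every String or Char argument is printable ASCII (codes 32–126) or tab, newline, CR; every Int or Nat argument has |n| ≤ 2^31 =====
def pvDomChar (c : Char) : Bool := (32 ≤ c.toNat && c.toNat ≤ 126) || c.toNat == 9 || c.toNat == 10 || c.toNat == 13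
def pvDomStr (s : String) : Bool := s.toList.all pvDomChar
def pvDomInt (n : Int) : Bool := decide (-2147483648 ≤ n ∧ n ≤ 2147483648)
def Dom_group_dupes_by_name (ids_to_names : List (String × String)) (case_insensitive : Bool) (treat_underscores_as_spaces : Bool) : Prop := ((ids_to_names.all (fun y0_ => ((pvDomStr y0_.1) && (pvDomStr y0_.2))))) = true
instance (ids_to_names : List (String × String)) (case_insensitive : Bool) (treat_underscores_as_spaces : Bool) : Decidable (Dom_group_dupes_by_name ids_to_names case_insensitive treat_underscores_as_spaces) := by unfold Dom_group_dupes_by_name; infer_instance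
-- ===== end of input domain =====

-- B replaces A's build-all-groups-then-filter with a two-pass count-then-collect (Counter of
-- normalized names, then append only ids of names counted ≥ 2); same complexity, no speed claim.

-- normalize_name_for_compare (shared module helper, used by both A and B)
def normalize_name_for_compare (text : String) (case_insensitive : Bool) (treat_underscores_as_spaces : Bool) : String :=
  let t := if treat_underscores_as_spaces then PySem.Str.replace text "_" " " else text
  if case_insensitive then PySem.Str.lower t else t

-- ===== PORT A =====
-- name_groups is a defaultdict(list); name_groups[k].append(item_id) = modify k [] (· ++ [item_id]).
-- The final dict comprehension keeps items (unique keys, insertion order) with len ≥ 2: items.filter.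
def group_dupes_by_name (ids_to_names : List (String × String)) (case_insensitive : Bool) (treat_underscores_as_spaces : Bool) : List (String × List String) :=
  let name_groups := ids_to_names.foldl
    (fun d p => d.modify (normalize_name_for_compare p.2 case_insensitive treat_underscores_as_spaces) [] (fun l => l ++ [p.1]))
    PySem.Dict.empty
  name_groups.items.filter (fun p => decide (2 ≤ p.2.length))

-- ===== PORT B =====
-- counts = Counter(normalized names); second pass collects ids whose key counts ≥ 2
-- (result.setdefault(k, []).append(item_id) = modify k [] (· ++ [item_id])).
def group_dupes_by_name_alt (ids_to_names : List (String × String)) (case_insensitive : Bool) (treat_underscores_as_spaces : Bool) : List (String × List String) :=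
  let counts := PySem.Dict.counter (ids_to_names.map (fun p => normalize_name_for_compare p.2 case_insensitive treat_underscores_as_spaces))
  let result := ids_to_names.foldl
    (fun r p =>
      let k := normalize_name_for_compare p.2 case_insensitive treat_underscores_as_spaces
      if 2 ≤ counts.getD k 0 then r.modify k [] (fun l => l ++ [p.1]) else r)
    PySem.Dict.empty
  result.items

-- ===== PRECONDITION & SPEC =====
def Spec_group_dupes_by_name (ids_to_names : List (String × String)) (case_insensitive : Bool) (treat_underscores_as_spaces : Bool) (out : List (String × List String)) : Prop := out = group_dupes_by_name_alt ids_to_names case_insensitive treat_underscores_as_spaces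
instance (ids_to_names : List (String × String)) (case_insensitive : Bool) (treat_underscores_as_spaces : Bool) (out : List (String × List String)) : Decidable (Spec_group_dupes_by_name ids_to_names case_insensitive treat_underscores_as_spaces out) := by unfold Spec_group_dupes_by_name; infer_instance

-- ===== CLAIM (what is proved, stated in full; the proofs are below) =====
def Claim_equal_group_dupes_by_name : Prop := ∀ (ids_to_names : List (String × String)) (case_insensitive : Bool) (treat_underscores_as_spaces : Bool), Dom_group_dupes_by_name ids_to_names case_insensitive treat_underscores_as_spaces → Spec_group_dupes_by_name ids_to_names case_insensitive treat_underscores_as_spaces (group_dupes_by_name ids_to_names case_insensitive treat_underscores_as_spaces)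

-- ===== LEMMAS AND PROOFS =====

-- set(xs) commutes with a filter
lemma set_ofList_filter {α : Type} [BEq α] [LawfulBEq α] (q : α → Bool) (l : List α) :
    PySem.Set.ofList (l.filter q) = (PySem.Set.ofList l).filter q := by
  induction l using List.reverseRecOn with
  | nil => rfl
  | append_singleton l x ih =>
    by_cases hq : q x = true
    · rw [List.filter_append, show List.filter q [x] = [x] by simp [hq],
        PySem.Set.ofList_append_singleton, PySem.Set.ofList_append_singleton, ih,
        PySem.Set.add_eq_ite, PySem.Set.add_eq_ite]
      by_cases hx : x ∈ PySem.Set.ofList l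
      · simp [hx, List.mem_filter, hq]
      · simp [hx, List.mem_filter, List.filter_append, hq]
    · rw [List.filter_append, show List.filter q [x] = [] by simp [hq], List.append_nil, ih,
        PySem.Set.ofList_append_singleton, PySem.Set.add_eq_ite]
      by_cases hx : x ∈ PySem.Set.ofList l
      · simp [hx]
      · simp [hx, List.filter_append, hq]

-- the generic core: group-then-filter(len ≥ 2) = count-then-collect, for any key/id functions
lemma grouped_filter_eq {α : Type} (key : α → String) (idf : α → String) (xs : List α) :
    ((xs.foldl (fun d p => d.modify (key p) [] (fun l => l ++ [idf p])) PySem.Dict.empty).items.filter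
        (fun p => decide (2 ≤ p.2.length)))
      = (xs.foldl (fun r p =>
            if 2 ≤ (PySem.Dict.counter (xs.map key)).getD (key p) 0
            then r.modify (key p) [] (fun l => l ++ [idf p]) else r)
          PySem.Dict.empty).items := by
  classical
  set q : String → Bool := fun k => decide (2 ≤ ((xs.map key).count k : Int)) with hqdef
  have hfoldA : ∀ (ys : List α),
      ys.foldl (fun d p => d.modify (key p) [] (fun l => l ++ [idf p])) PySem.Dict.empty
        = (ys.map (fun p => (key p, idf p))).foldl (fun d p => d.modify p.1 [] (fun l => l ++ [p.2])) PySem.Dict.empty := by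
    intro ys; rw [List.foldl_map]
  -- B's guarded fold is the plain fold over the filtered list
  have hB : (xs.foldl (fun r p =>
            if 2 ≤ (PySem.Dict.counter (xs.map key)).getD (key p) 0
            then r.modify (key p) [] (fun l => l ++ [idf p]) else r)
          PySem.Dict.empty)
      = (xs.filter (fun p => q (key p))).foldl
          (fun d p => d.modify (key p) [] (fun l => l ++ [idf p])) PySem.Dict.empty := by
    rw [List.foldl_filter]
    have hfun : (fun (r : PySem.Dict String (List String)) p =>
          if 2 ≤ (PySem.Dict.counter (xs.map key)).getD (key p) 0
          then r.modify (key p) [] (fun l => l ++ [idf p]) else r)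
        = (fun (r : PySem.Dict String (List String)) p =>
          if q (key p) then r.modify (key p) [] (fun l => l ++ [idf p]) else r) := by
      funext r p
      simp [hqdef, PySem.Dict.getD_counter]
    rw [hfun]
  rw [hB, hfoldA, hfoldA]
  set ys := xs.filter (fun p => q (key p)) with hys
  set m : List (String × String) := xs.map (fun p => (key p, idf p)) with hm
  have hmk : m.map Prod.fst = xs.map key := by simp [hm]
  have hm' : ys.map (fun p => (key p, idf p)) = m.filter (fun pr => q pr.1) := by
    rw [hys, hm, List.filter_map]
    rfl
  rw [hm']
  -- items of a modify-fold: keys are the deduped key list, values the per-key collected ids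
  have hitems : ∀ (l : List (String × String)),
      (l.foldl (fun d p => d.modify p.1 [] (fun lst => lst ++ [p.2])) PySem.Dict.empty).items
        = (PySem.Set.ofList (l.map Prod.fst)).map
            (fun k => (k, (l.filter (fun pr => pr.1 == k)).map Prod.snd)) := by
    intro l
    set d := l.foldl (fun d p => d.modify p.1 [] (fun lst => lst ++ [p.2])) PySem.Dict.empty with hd
    have hnd : d.keys.Nodup := by
      rw [hd]
      exact PySem.Dict.nodup_keys_foldl_modify_key l Prod.fst []
        (fun d p => fun lst => lst ++ [p.2]) PySem.Dict.empty (by simp [PySem.Dict.keys_empty])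
    have hkeys : d.keys = PySem.Set.ofList (l.map Prod.fst) := by
      rw [hd, PySem.Dict.keys_foldl_modify_key]
      simp [PySem.Dict.keys_empty, PySem.Set.update_nil_left]
    rw [PySem.Dict.items_eq_map_keys d hnd [], hkeys]
    apply List.map_congr_left
    intro k _
    have hg := PySem.Dict.getD_foldl_modify_append (l := l) (d := PySem.Dict.empty) (c := k)
    simp only [← hd] at hg
    rw [hg, PySem.Dict.getD_empty, List.nil_append]
  rw [hitems, hitems]
  -- the length of the group at k is the multiplicity of k among the keys
  have hlen : ∀ k, ((m.filter (fun pr => pr.1 == k)).map Prod.snd).length = (xs.map key).count k := by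
    intro k
    rw [List.length_map, ← List.countP_eq_length_filter, List.count_eq_countP, hm,
      List.countP_map, List.countP_map]
    rfl
  -- left side: filtering the mapped items is mapping over the filtered key set
  have hql : (fun p : String × List String => decide (2 ≤ p.2.length))
        ∘ (fun k => (k, (m.filter (fun pr => pr.1 == k)).map Prod.snd))
      = fun k => q k := by
    funext k
    simp only [Function.comp, hlen k, hqdef]
    simp
  rw [List.filter_map, hql]
  -- right side: set-of-keys commutes with the key-level filter
  have hmf : (m.filter (fun pr => q pr.1)).map Prod.fst = (m.map Prod.fst).filter q := by
    conv_rhs => rw [List.filter_map]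
    rfl
  rw [hmf, set_ofList_filter]
  apply List.map_congr_left
  intro k hk
  have hkq : q k = true := (List.mem_filter.mp hk).2
  congr 1
  rw [List.filter_filter]
  apply congrArg
  apply List.filter_congr
  intro pr _
  by_cases h : pr.1 = k
  · simp [h, hkq]
  · simp [h]

-- ===== VERDICT (by name: the statement is the Claim_ definition above) =====
theorem group_dupes_by_name_spec : Claim_equal_group_dupes_by_name := by
  intro xs ci us _
  show group_dupes_by_name xs ci us = group_dupes_by_name_alt xs ci us
  unfold group_dupes_by_name group_dupes_by_name_alt
  apply grouped_filter_eq (fun p => normalize_name_for_compare p.2 ci us) Prod.fst
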